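-- pv_equiv track=rewrite | github.com/aniketmaithani/MemGuard | memguard/_profiler.py | compute_object_delta
-- ===== SOURCE A (Python) =====
-- def compute_object_delta(
--     before: dict[str, int],
--     after: dict[str, int],
-- ) -> dict[str, tuple[int, int, int]]:
--     """Return ``{type_name: (before, after, delta)}`` for every changed type."""
--     result = {}
--     for k in set(before) | set(after):
--         b = before.get(k, 0)
--         a = after.get(k, 0)
--         if a != b:
--             result[k] = (b, a, a - b)
--     return result
-- ===== SOURCE B (Python) =====
-- def compute_object_delta(
--     before: dict[str, int],
--     after: dict[str, int],
-- ) -> dict[str, tuple[int, int, int]]: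
--     """Two-pass diff: changed/removed keys from ``before``, then added keys from ``after``."""
--     result = {}
--     for k, b in before.items():
--         a = after.get(k, 0)
--         if a != b:
--             result[k] = (b, a, a - b)
--     for k, a in after.items():
--         if k not in before and a != 0:
--             result[k] = (0, a, a)
--     return result
-- ===== Notes on version B (the rewrite author's own statement) =====
-- stated objective: alternative
-- what changed: Instead of one pass over the key union set(before)|set(after), B makes two differently shaped passes: one over before.items() (delta against after.get), one over after.items() restricted to keys absent from before (added types), never materialising the union set.
import Mathlib
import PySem

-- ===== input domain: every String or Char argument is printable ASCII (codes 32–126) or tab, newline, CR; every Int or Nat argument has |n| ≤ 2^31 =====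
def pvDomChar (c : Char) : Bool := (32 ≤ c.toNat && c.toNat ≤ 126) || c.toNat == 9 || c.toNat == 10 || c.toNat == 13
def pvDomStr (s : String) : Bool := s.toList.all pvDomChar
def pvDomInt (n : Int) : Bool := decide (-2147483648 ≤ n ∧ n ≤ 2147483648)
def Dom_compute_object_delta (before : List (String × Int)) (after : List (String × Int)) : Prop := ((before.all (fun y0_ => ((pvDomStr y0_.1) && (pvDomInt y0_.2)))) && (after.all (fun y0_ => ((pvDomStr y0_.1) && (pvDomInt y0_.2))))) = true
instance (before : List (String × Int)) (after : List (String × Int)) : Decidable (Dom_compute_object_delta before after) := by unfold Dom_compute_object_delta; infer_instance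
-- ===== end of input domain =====

-- B replaces A's single pass over the key union with an added/changed two-pass diff (before.items then after-only keys); equal return value, objective: alternative decomposition.


-- ===== PORT A =====
-- for k in set(before) | set(after): b = before.get(k,0); a = after.get(k,0); if a != b: result[k] = (b,a,a-b)
def compute_object_delta (before : List (String × Int)) (after : List (String × Int)) : List (String × Int × Int × Int) :=
  let keys := PySem.Set.union (PySem.Set.ofList (before.map Prod.fst)) (PySem.Set.ofList (after.map Prod.fst))
  (keys.foldl (fun (result : PySem.Dict String (Int × Int × Int)) k =>
      let b := (PySem.Dict.mk before).getD k 0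
      let a := (PySem.Dict.mk after).getD k 0
      if a ≠ b then result.insert k (b, a, a - b) else result)
    PySem.Dict.empty).items

-- ===== PORT B =====
-- first loop: for k, b in before.items(); second loop: for k, a in after.items() with k not in before
def compute_object_delta_alt (before : List (String × Int)) (after : List (String × Int)) : List (String × Int × Int × Int) :=
  let result1 := before.foldl (fun (result : PySem.Dict String (Int × Int × Int)) kb =>
      let a := (PySem.Dict.mk after).getD kb.1 0
      if a ≠ kb.2 then result.insert kb.1 (kb.2, a, a - kb.2) else result)
    PySem.Dict.empty
  (after.foldl (fun (result : PySem.Dict String (Int × Int × Int)) ka =>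
      if (PySem.Dict.mk before).contains ka.1 = false ∧ ka.2 ≠ 0 then result.insert ka.1 (0, ka.2, ka.2) else result)
    result1).items

-- ===== PRECONDITION & SPEC =====
-- Pre_ requires the two association lists to have pairwise-distinct keys: they port Python dicts,
-- whose keys are distinct by construction, so no input A actually accepts is excluded.
def Pre_compute_object_delta (before : List (String × Int)) (after : List (String × Int)) : Prop :=
  (before.map Prod.fst).Nodup ∧ (after.map Prod.fst).Nodup
instance (before : List (String × Int)) (after : List (String × Int)) : Decidable (Pre_compute_object_delta before after) := by unfold Pre_compute_object_delta; infer_instance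
def pvWitness_compute_object_delta : (List (String × Int)) × (List (String × Int)) :=
  ([("list", 3), ("dict", 5)], [("dict", 5), ("tuple", 2)])
def Spec_compute_object_delta (before : List (String × Int)) (after : List (String × Int)) (out : List (String × Int × Int × Int)) : Prop := out = compute_object_delta_alt before after
instance (before : List (String × Int)) (after : List (String × Int)) (out : List (String × Int × Int × Int)) : Decidable (Spec_compute_object_delta before after out) := by unfold Spec_compute_object_delta; infer_instance

-- ===== CLAIM (what is proved, stated in full; the proofs are below) =====
def Claim_equal_compute_object_delta : Prop := ∀ (before : List (String × Int)) (after : List (String × Int)), Dom_compute_object_delta before after → Pre_compute_object_delta before after → Spec_compute_object_delta before after (compute_object_delta before after)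

-- ===== LEMMAS AND PROOFS =====

-- A's fold over before's keys is B's first loop over before's items.
theorem cod_first_pass (before after : List (String × Int))
    (hb : (before.map Prod.fst).Nodup) :
    (before.map Prod.fst).foldl (fun (result : PySem.Dict String (Int × Int × Int)) k =>
        if (PySem.Dict.mk after).getD k 0 ≠ (PySem.Dict.mk before).getD k 0 then
          result.insert k ((PySem.Dict.mk before).getD k 0, (PySem.Dict.mk after).getD k 0,
            (PySem.Dict.mk after).getD k 0 - (PySem.Dict.mk before).getD k 0)
        else result) PySem.Dict.empty
    = before.foldl (fun (result : PySem.Dict String (Int × Int × Int)) kb =>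
        if (PySem.Dict.mk after).getD kb.1 0 ≠ kb.2 then
          result.insert kb.1 (kb.2, (PySem.Dict.mk after).getD kb.1 0, (PySem.Dict.mk after).getD kb.1 0 - kb.2)
        else result) PySem.Dict.empty := by
  rw [List.foldl_map]
  apply PySem.List.foldl_congr_mem
  intro acc p hp
  have hget : (PySem.Dict.mk before).getD p.1 0 = p.2 :=
    PySem.Dict.getD_of_mem_items (PySem.Dict.mk before) hp hb 0
  simp only [hget]

-- A's fold over after's keys not in before is B's second loop over after's items.
theorem cod_second_pass (before after : List (String × Int))
    (ha : (after.map Prod.fst).Nodup) (d : PySem.Dict String (Int × Int × Int)) :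
    (List.filter (fun y => !PySem.Set.contains (before.map Prod.fst) y)
        (PySem.Set.ofList (after.map Prod.fst))).foldl
      (fun (result : PySem.Dict String (Int × Int × Int)) k =>
        if (PySem.Dict.mk after).getD k 0 ≠ (PySem.Dict.mk before).getD k 0 then
          result.insert k ((PySem.Dict.mk before).getD k 0, (PySem.Dict.mk after).getD k 0,
            (PySem.Dict.mk after).getD k 0 - (PySem.Dict.mk before).getD k 0)
        else result) d
    = after.foldl (fun (result : PySem.Dict String (Int × Int × Int)) ka =>
        if (PySem.Dict.mk before).contains ka.1 = false ∧ ka.2 ≠ 0 then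
          result.insert ka.1 (0, ka.2, ka.2)
        else result) d := by
  simp only [PySem.Set.ofList_eq_self_of_nodup _ ha]
  rw [List.foldl_filter, List.foldl_map]
  apply PySem.List.foldl_congr_mem
  intro acc p hp
  have hgeta : (PySem.Dict.mk after).getD p.1 0 = p.2 :=
    PySem.Dict.getD_of_mem_items (PySem.Dict.mk after) hp ha 0
  by_cases hmem : p.1 ∈ before.map Prod.fst
  · have hc : (PySem.Dict.mk before).contains p.1 = true := by
      simp only [PySem.Dict.contains_mk, List.any_eq_true, beq_iff_eq]
      obtain ⟨q, hq, hq1⟩ := List.mem_map.mp hmem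
      exact ⟨q, hq, hq1⟩
    have hs : PySem.Set.contains (before.map Prod.fst) p.1 = true := by
      simp [PySem.Set.contains_eq_listContains, hmem]
    have h1 : ¬ ((!PySem.Set.contains (List.map Prod.fst before) p.1) = true) := by
      rw [hs]; simp
    have h2 : ¬ ((PySem.Dict.mk before).contains p.1 = false ∧ p.2 ≠ 0) := by
      rw [hc]; simp
    rw [if_neg h1, if_neg h2]
  · have hc : (PySem.Dict.mk before).contains p.1 = false := by
      simp only [PySem.Dict.contains_mk, List.any_eq_false, beq_iff_eq]
      intro q hq hq1
      exact hmem (List.mem_map.mpr ⟨q, hq, hq1⟩)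
    have hs : PySem.Set.contains (before.map Prod.fst) p.1 = false := by
      simp [PySem.Set.contains_eq_listContains, hmem]
    have hgetb : (PySem.Dict.mk before).getD p.1 0 = 0 :=
      PySem.Dict.getD_of_not_contains _ 0 hc
    have h1 : (!PySem.Set.contains (List.map Prod.fst before) p.1) = true := by rw [hs]; rfl
    rw [if_pos h1]
    simp only [hgetb, hgeta, hc, sub_zero]
    by_cases hz : p.2 = 0 <;> simp [hz]

-- ===== VERDICT (by name: the statement is the Claim_ definition above) =====
theorem compute_object_delta_spec : Claim_equal_compute_object_delta := by
  intro before after _hdom hpre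
  obtain ⟨hb, ha⟩ := hpre
  unfold Spec_compute_object_delta
  simp only [compute_object_delta, compute_object_delta_alt, PySem.Set.union]
  rw [PySem.Set.update_eq_append_filter]
  simp only [PySem.Set.ofList_ofList, PySem.Set.ofList_eq_self_of_nodup _ hb, List.foldl_append]
  rw [cod_first_pass before after hb, cod_second_pass before after ha]
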